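-- pv_equiv track=rewrite | github.com/skdreier/NIrelandNLP | model_training_and_evaluation/ocr_scoring.py | get_index_of_nth_nonnull_char_in_list
-- ===== SOURCE A (Python) =====
-- def get_index_of_nth_nonnull_char_in_list(list_of_chars, n):
--     total_num_nonnull_chars_passed = 0
--     for i, char in enumerate(list_of_chars):
--         if total_num_nonnull_chars_passed == n:
--             return i - 1
--         if char is not None:
--             total_num_nonnull_chars_passed += 1
--     if total_num_nonnull_chars_passed == n:
--         return len(list_of_chars) - 1
--     return None
-- ===== SOURCE B (Python) =====
-- def get_index_of_nth_nonnull_char_in_list(list_of_chars, n):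
--     indices = [j for j, c in enumerate(list_of_chars) if c is not None]
--     if n == 0:
--         return -1
--     if 1 <= n <= len(indices):
--         return indices[n - 1]
--     return None
-- ===== Notes on version B (the rewrite author's own statement) =====
-- stated objective: simpler
-- what changed: Replaces A's early-exit counting scan with its i-1 off-by-one bookkeeping by building the list of non-null positions once and answering by direct indexing indices[n-1].
import Mathlib
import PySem

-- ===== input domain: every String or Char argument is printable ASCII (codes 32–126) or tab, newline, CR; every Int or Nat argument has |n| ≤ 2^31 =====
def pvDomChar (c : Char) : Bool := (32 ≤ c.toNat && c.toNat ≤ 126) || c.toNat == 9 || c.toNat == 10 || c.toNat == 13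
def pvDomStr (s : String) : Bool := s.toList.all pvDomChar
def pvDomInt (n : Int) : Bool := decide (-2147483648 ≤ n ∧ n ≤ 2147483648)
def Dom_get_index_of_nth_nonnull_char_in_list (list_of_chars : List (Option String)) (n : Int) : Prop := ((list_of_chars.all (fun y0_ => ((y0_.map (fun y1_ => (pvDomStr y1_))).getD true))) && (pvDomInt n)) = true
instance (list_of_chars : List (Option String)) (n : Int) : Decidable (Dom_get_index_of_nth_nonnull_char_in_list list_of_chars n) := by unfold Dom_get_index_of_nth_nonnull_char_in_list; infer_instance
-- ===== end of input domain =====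

-- B replaces A's early-exit counting scan by a build-then-index pass over the non-null positions (objective: simpler).

-- ===== PORT A =====
-- the enumerate loop: i is the running index, c the count of non-null chars passed
def pvLoopA (n : Int) : List (Option String) → Int → Int → Option Int
  | [], i, c => if c = n then some (i - 1) else none   -- post-loop: len - 1 = final i - 1
  | ch :: rest, i, c =>
    if c = n then some (i - 1)
    else pvLoopA n rest (i + 1) (if ch.isSome then c + 1 else c)

def get_index_of_nth_nonnull_char_in_list (list_of_chars : List (Option String)) (n : Int) : Option Int :=
  pvLoopA n list_of_chars 0 0

-- ===== PORT B =====
-- indices = [j for j, c in enumerate(list_of_chars) if c is not None]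
def pvIndicesB (list_of_chars : List (Option String)) : List Int :=
  (PySem.List.enumerate list_of_chars).filterMap (fun p => if p.2.isSome then some p.1 else none)

def get_index_of_nth_nonnull_char_in_list_alt (list_of_chars : List (Option String)) (n : Int) : Option Int :=
  let indices := pvIndicesB list_of_chars
  if n = 0 then some (-1)
  else if 1 ≤ n ∧ n ≤ (indices.length : Int) then PySem.List.pyGet? indices (n - 1)
  else none

-- ===== PRECONDITION & SPEC =====
def Spec_get_index_of_nth_nonnull_char_in_list (list_of_chars : List (Option String)) (n : Int) (out : Option Int) : Prop := out = get_index_of_nth_nonnull_char_in_list_alt list_of_chars n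
instance (list_of_chars : List (Option String)) (n : Int) (out : Option Int) : Decidable (Spec_get_index_of_nth_nonnull_char_in_list list_of_chars n out) := by unfold Spec_get_index_of_nth_nonnull_char_in_list; infer_instance

-- ===== CLAIM (what is proved, stated in full; the proofs are below) =====
def Claim_equal_get_index_of_nth_nonnull_char_in_list : Prop := ∀ (list_of_chars : List (Option String)) (n : Int), Dom_get_index_of_nth_nonnull_char_in_list list_of_chars n → Spec_get_index_of_nth_nonnull_char_in_list list_of_chars n (get_index_of_nth_nonnull_char_in_list list_of_chars n)

-- ===== LEMMAS AND PROOFS =====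

-- The loop's meaning: either the counter already matches n, or the answer is read off
-- the non-null index table of the remaining suffix (enumerated from i).
theorem pvLoopA_eq (n : Int) (l : List (Option String)) (i c : Int) :
    pvLoopA n l i c =
      if c = n then some (i - 1)
      else
        let ks := (PySem.List.enumerate l i).filterMap (fun p => if p.2.isSome then some p.1 else none)
        if 1 ≤ n - c ∧ n - c ≤ (ks.length : Int) then ks[(n - c - 1).toNat]? else none := by
  induction l generalizing i c with
  | nil =>
    simp only [pvLoopA, PySem.List.enumerate_nil, List.filterMap_nil]
    by_cases h : c = n
    · simp [h]
    · simp only [h, if_false, List.length_nil]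
      simp
  | cons ch rest ih =>
    simp only [pvLoopA, PySem.List.enumerate_cons, List.filterMap_cons]
    by_cases h : c = n
    · simp [h]
    · simp only [h, if_false]
      rw [ih]
      cases ch with
      | none =>
        simp [h]
      | some s =>
        simp only [Option.isSome_some, if_true]
        by_cases h1 : c + 1 = n
        · have hn : n - c = 1 := by omega
          simp [h1, hn]
        · simp only [h1, if_false]
          set ks' := (PySem.List.enumerate rest (i + 1)).filterMap
              (fun p => if p.2.isSome then some p.1 else none) with hks
          by_cases h2 : 1 ≤ n - (c + 1) ∧ n - (c + 1) ≤ (ks'.length : Int)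
          · have h3 : (1 : Int) ≤ n - c ∧ n - c ≤ (((ks'.length + 1 : Nat)) : Int) := by
              push_cast; push_cast at h2; omega
            have hk : (n - c - 1).toNat = (n - (c + 1) - 1).toNat + 1 := by omega
            simp only [h2, List.length_cons, h3, hk, List.getElem?_cons_succ]
          · push_cast at h2
            rw [if_neg (by omega), if_neg (by simp only [List.length_cons]; push_cast; omega)]

-- ===== VERDICT (by name: the statement is the Claim_ definition above) =====
theorem get_index_of_nth_nonnull_char_in_list_spec : Claim_equal_get_index_of_nth_nonnull_char_in_list := by
  intro l n _
  unfold Spec_get_index_of_nth_nonnull_char_in_list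
  unfold get_index_of_nth_nonnull_char_in_list get_index_of_nth_nonnull_char_in_list_alt
  rw [pvLoopA_eq]
  simp only [pvIndicesB]
  by_cases h0 : (0 : Int) = n
  · simp [← h0]
  · have h0' : ¬ n = 0 := fun h => h0 h.symm
    simp only [h0, h0', if_false]
    set ks := (PySem.List.enumerate l 0).filterMap (fun p => if p.2.isSome then some p.1 else none)
    by_cases h1 : 1 ≤ n ∧ n ≤ (ks.length : Int)
    · have : PySem.List.pyGet? ks (n - 1) = ks[(n - 1).toNat]? :=
        PySem.List.pyGet?_of_nonneg ks (show (0:Int) ≤ n - 1 by omega)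
      simp only [Int.sub_zero, h1, this]
    · simp [h1]
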